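-- pv_equiv track=rewrite | github.com/chloeeekim/TIL | Algorithm/Programmers/Python/86052.py | solution
-- ===== SOURCE A (Python) =====
-- def solution(grid):
--     height, width = len(grid), len(grid[0])
--     visited = [[[False] * 4 for _ in range(width)] for _ in range(height)]
--     res = []
--     dxy = [(1, 0), (0, -1), (-1, 0), (0, 1)]
--
--     for y in range(height):
--         for x in range(width):
--             for d in range(4):
--                 if visited[y][x][d]:
--                     continue
--                 count = 0
--                 ny, nx = y, x
--                 while not visited[ny][nx][d]:
--                     count += 1
--                     visited[ny][nx][d] = True
--                     if grid[ny][nx] == "S":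
--                         pass
--                     elif grid[ny][nx] == "L":
--                         d = (d - 1) % 4
--                     elif grid[ny][nx] == "R":
--                         d = (d + 1) % 4
--
--                     ny = (ny + dxy[d][0]) % height
--                     nx = (nx + dxy[d][1]) % width
--
--                 res.append(count)
--     return sorted(res)
-- ===== SOURCE B (Python) =====
-- def solution(grid):
--     height, width = len(grid), len(grid[0])
--     n = height * width * 4
--
--     def step(i):
--         y, x, d = i // (4 * width), i // 4 % width, i % 4
--         c = grid[y][x]
--         if c == "L":
--             d = (d + 3) % 4
--         elif c == "R":
--             d = (d + 1) % 4
--         if d == 0: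
--             y = (y + 1) % height
--         elif d == 1:
--             x = (x + width - 1) % width
--         elif d == 2:
--             y = (y + height - 1) % height
--         else:
--             x = (x + 1) % width
--         return 4 * (width * y + x) + d
--
--     # step is a permutation of the n states (every move is invertible), so the
--     # state graph is a disjoint union of cycles; record each cycle's length
--     # once, at the cycle's smallest state (cycle-leader counting, no visited set).
--     res = []
--     for s in range(n):
--         cur, length = step(s), 1
--         while cur > s:
--             cur, length = step(cur), length + 1
--         if cur == s:
--             res.append(length)
--     return sorted(res)
-- ===== Notes on version B (the rewrite author's own statement) =====
-- stated objective: alternative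
-- what changed: B drops A's 3D visited array and chain-marking walk entirely: it flattens states to ids, observes that the beam-step map is a permutation (every move is invertible), and counts each cycle once at its smallest state by walking the cycle until it returns to the start (leader, append length) or dips below it (skip).
import Mathlib
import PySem

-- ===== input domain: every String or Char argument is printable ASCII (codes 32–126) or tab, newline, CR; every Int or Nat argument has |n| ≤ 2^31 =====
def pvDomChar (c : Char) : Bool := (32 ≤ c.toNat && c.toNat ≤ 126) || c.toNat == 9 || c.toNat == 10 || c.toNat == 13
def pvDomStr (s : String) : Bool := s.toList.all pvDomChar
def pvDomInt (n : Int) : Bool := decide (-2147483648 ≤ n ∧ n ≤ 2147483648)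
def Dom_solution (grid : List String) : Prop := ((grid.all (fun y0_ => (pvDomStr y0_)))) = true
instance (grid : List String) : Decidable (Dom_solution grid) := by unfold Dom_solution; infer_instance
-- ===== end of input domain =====

-- B drops A's visited-marking chain walk: the beam-step map is a permutation of the flattened
-- states, so B counts each cycle once, at its smallest state; objective: alternative.

-- ===== PORT A =====
-- grid[y][x] (indices are always in range under Pre_solution, where the defaults are never used)
def pvGridChar (grid : List String) (y x : Nat) : Char :=
  ((grid.getD y "").toList).getD x ' '

-- visited[y][x][d] read / write (in range under Pre_solution)
def pvVget (v : List (List (List Bool))) (y x d : Nat) : Bool :=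
  (((v.getD y []).getD x []).getD d false)

def pvVset (v : List (List (List Bool))) (y x d : Nat) : List (List (List Bool)) :=
  v.modify y (fun row => row.modify x (fun cell => cell.set d true))

-- dxy[d] for d = 0,1,2,3 (A only ever indexes with d in range(4) or its rotations mod 4)
def pvDxy (d : Int) : Int × Int :=
  if d = 0 then (1, 0) else if d = 1 then (0, -1) else if d = 2 then (-1, 0) else (0, 1)

-- A's inner while loop; fuel h*w*4+1 is exact: each iteration marks an unvisited state, so the
-- Python loop performs at most h*w*4 iterations before the visited check stops it.
def pvRunA (grid : List String) (h w : Int) :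
    Nat → List (List (List Bool)) → Int → Int → Int → Int → List (List (List Bool)) × Int
  | 0, v, count, _, _, _ => (v, count)
  | fuel + 1, v, count, ny, nx, d =>
    if pvVget v ny.toNat nx.toNat d.toNat then (v, count)
    else
      let count' := count + 1
      let v' := pvVset v ny.toNat nx.toNat d.toNat
      let c := pvGridChar grid ny.toNat nx.toNat
      let d' := if c = 'S' then d
                else if c = 'L' then PySem.Int.mod (d - 1) 4
                else if c = 'R' then PySem.Int.mod (d + 1) 4
                else d
      let ny' := PySem.Int.mod (ny + (pvDxy d').1) h
      let nx' := PySem.Int.mod (nx + (pvDxy d').2) w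
      pvRunA grid h w fuel v' count' ny' nx' d'

def solution (grid : List String) : List Int :=
  let h : Int := grid.length
  let w : Int := ((grid.getD 0 "").toList.length : Int)
  let fuel : Nat := grid.length * (grid.getD 0 "").toList.length * 4 + 1
  let v0 := List.replicate grid.length
      (List.replicate (grid.getD 0 "").toList.length (List.replicate 4 false))
  let out := (PySem.List.pyRange 0 h 1).foldl (fun acc y =>
    (PySem.List.pyRange 0 w 1).foldl (fun acc x =>
      (PySem.List.pyRange 0 4 1).foldl (fun acc d =>
        if pvVget acc.1 y.toNat x.toNat d.toNat then acc
        else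
          let r := pvRunA grid h w fuel acc.1 0 y x d
          (r.1, acc.2 ++ [r.2])) acc) acc) (v0, ([] : List Int))
  PySem.List.sorted out.2 (fun z => z) false

-- ===== PORT B =====
-- B's local helper step(i): successor of flattened state i = 4*(width*y + x) + d
def pvStep (grid : List String) (height width : Nat) (i : Nat) : Nat :=
  let y := i / (4 * width)
  let x := i / 4 % width
  let d := i % 4
  let c := pvGridChar grid y x
  let d' := if c = 'L' then (d + 3) % 4 else if c = 'R' then (d + 1) % 4 else d
  let p := if d' = 0 then ((y + 1) % height, x)
           else if d' = 1 then (y, (x + width - 1) % width)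
           else if d' = 2 then ((y + height - 1) % height, x)
           else (y, (x + 1) % width)
  4 * (width * p.1 + p.2) + d'

-- B's while loop (cur, length := step(cur), length+1 while cur > s); fuel n is exact: the walk
-- stays on the cycle through s, whose length is at most n, and stops on returning to s.
def pvWalkAlt (grid : List String) (h w s : Nat) : Nat → Nat → Int → Nat × Int
  | 0, cur, len => (cur, len)
  | fuel + 1, cur, len =>
    if s < cur then pvWalkAlt grid h w s fuel (pvStep grid h w cur) (len + 1)
    else (cur, len)

def solution_alt (grid : List String) : List Int :=
  let height := grid.length
  let width := (grid.getD 0 "").toList.length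
  let n := height * width * 4
  let res := (List.range n).foldl (fun res s =>
    let cur_len := pvWalkAlt grid height width s n (pvStep grid height width s) 1
    if cur_len.1 = s then res ++ [cur_len.2] else res) []
  PySem.List.sorted res (fun z => z) false

-- ===== PRECONDITION & SPEC =====
-- Pre_ is exactly where the Python A returns: A raises IndexError on the empty grid (grid[0])
-- and whenever some row is shorter than len(grid[0]) (every cell in the first width columns of
-- every row is read).
def Pre_solution (grid : List String) : Prop :=
  grid ≠ [] ∧ ∀ s ∈ grid, (grid.getD 0 "").toList.length ≤ s.toList.length

instance (grid : List String) : Decidable (Pre_solution grid) := by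
  unfold Pre_solution; infer_instance

def pvWitness_solution : List String := ["SL", "RS"]

def Spec_solution (grid : List String) (out : List Int) : Prop := out = solution_alt grid
instance (grid : List String) (out : List Int) : Decidable (Spec_solution grid out) := by
  unfold Spec_solution; infer_instance

-- ===== CLAIM (what is proved, stated in full; the proofs are below) =====
def Claim_equal_solution : Prop :=
  ∀ (grid : List String), Dom_solution grid → Pre_solution grid →
    Spec_solution grid (solution grid)

-- ===== LEMMAS AND PROOFS =====

-- decoding the flattened state id
lemma pvDecode (w y x d : Nat) (hx : x < w) (hd : d < 4) :
    (4 * (w * y + x) + d) / (4 * w) = y ∧ (4 * (w * y + x) + d) / 4 % w = x ∧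
      (4 * (w * y + x) + d) % 4 = d := by
  have hw : 0 < w := by omega
  have h4 : (4 * (w * y + x) + d) / 4 = w * y + x := by
    rw [Nat.mul_add_div (by norm_num)]; omega
  refine ⟨?_, ?_, ?_⟩
  · rw [← Nat.div_div_eq_div_mul, h4, Nat.mul_add_div hw, Nat.div_eq_of_lt hx]; omega
  · rw [h4, Nat.mul_add_mod]; exact Nat.mod_eq_of_lt hx
  · rw [Nat.mul_add_mod]; exact Nat.mod_eq_of_lt hd

lemma pvEncLt (h w y x d : Nat) (hy : y < h) (hx : x < w) (hd : d < 4) :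
    4 * (w * y + x) + d < h * w * 4 := by nlinarith

lemma pvDecodeAll (h w i : Nat) (hw : 0 < w) (hi : i < h * w * 4) :
    ∃ y x d, y < h ∧ x < w ∧ d < 4 ∧ i = 4 * (w * y + x) + d := by
  refine ⟨i / 4 / w, i / 4 % w, i % 4, ?_, Nat.mod_lt _ hw, by omega, ?_⟩
  · rw [Nat.div_div_eq_div_mul]
    rw [Nat.div_lt_iff_lt_mul (by omega)]
    calc i < h * w * 4 := hi
    _ = h * (4 * w) := by ring
  · have hq : w * (i / 4 / w) + i / 4 % w = i / 4 := Nat.div_add_mod _ _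
    rw [hq]; omega

-- shape of A's visited structure and the cross-representation invariant
def pvShape (h w : Nat) (v : List (List (List Bool))) : Prop :=
  v.length = h ∧ (∀ i, i < h → (v.getD i []).length = w) ∧
    ∀ i, i < h → ∀ j, j < w → ((v.getD i []).getD j []).length = 4

def pvRel (h w : Nat) (v : List (List (List Bool))) (bv : List Bool) : Prop :=
  pvShape h w v ∧ bv.length = h * w * 4 ∧
    ∀ y, y < h → ∀ x, x < w → ∀ d, d < 4 →
      pvVget v y x d = bv.getD (4 * (w * y + x) + d) false

lemma pvGetD_modify {α : Type} (l : List α) (i j : Nat) (f : α → α) (d : α) :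
    (l.modify i f).getD j d = if i = j ∧ j < l.length then f (l.getD j d) else l.getD j d := by
  simp only [List.getD_eq_getElem?_getD, List.getElem?_modify]
  by_cases hj : j < l.length
  · rw [List.getElem?_eq_getElem hj]
    by_cases hij : i = j <;> simp [hij, hj]
  · rw [List.getElem?_eq_none (by omega)]
    simp [hj]

lemma pvGetD_set {α : Type} (l : List α) (i j : Nat) (a d : α) :
    (l.set i a).getD j d = if i = j ∧ j < l.length then a else l.getD j d := by
  simp only [List.getD_eq_getElem?_getD, List.getElem?_set]
  by_cases hj : j < l.length
  · by_cases hij : i = j <;> simp [hij, hj]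
  · rw [List.getElem?_eq_none (l := l) (by omega)]
    by_cases hij : i = j <;> simp [hij, hj]

lemma pvVget_vset (h w : Nat) (v : List (List (List Bool))) (hsh : pvShape h w v)
    (y x d y' x' d' : Nat) (hy : y < h) (hx : x < w) (_hd : d < 4)
    (hy' : y' < h) (hx' : x' < w) (hd' : d' < 4) :
    pvVget (pvVset v y x d) y' x' d' =
      if y' = y ∧ x' = x ∧ d' = d then true else pvVget v y' x' d' := by
  obtain ⟨hlen, hrow, hcell⟩ := hsh
  unfold pvVget pvVset
  rw [pvGetD_modify]
  by_cases hyy : y = y'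
  · subst hyy
    rw [if_pos ⟨rfl, by omega⟩, pvGetD_modify]
    by_cases hxx : x = x'
    · subst hxx
      rw [if_pos ⟨rfl, by rw [hrow y hy]; omega⟩, pvGetD_set]
      by_cases hdd : d = d'
      · subst hdd
        rw [if_pos ⟨rfl, by rw [hcell y hy x hx]; omega⟩, if_pos ⟨rfl, rfl, rfl⟩]
      · rw [if_neg (by tauto), if_neg (by tauto)]
    · rw [if_neg (by tauto), if_neg (by tauto)]
  · rw [if_neg (by tauto), if_neg (by tauto)]

lemma pvShape_vset (h w : Nat) (v : List (List (List Bool))) (hsh : pvShape h w v)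
    (y x d : Nat) : pvShape h w (pvVset v y x d) := by
  obtain ⟨hlen, hrow, hcell⟩ := hsh
  refine ⟨by simp [pvVset, List.length_modify, hlen], ?_, ?_⟩
  · intro i hi
    unfold pvVset
    rw [pvGetD_modify]
    split_ifs with hc
    · rw [List.length_modify]; exact hrow i hi
    · exact hrow i hi
  · intro i hi j hj
    unfold pvVset
    rw [pvGetD_modify]
    split_ifs with hc
    · rw [pvGetD_modify]
      split_ifs with hc2
      · rw [List.length_set]; exact hcell i hi j hj
      · exact hcell i hi j hj
    · exact hcell i hi j hj

lemma pvRel_vset (h w : Nat) (v : List (List (List Bool))) (bv : List Bool)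
    (hrel : pvRel h w v bv) (y x d : Nat) (hy : y < h) (hx : x < w) (hd : d < 4) :
    pvRel h w (pvVset v y x d) (bv.set (4 * (w * y + x) + d) true) := by
  obtain ⟨hsh, hbvlen, hpt⟩ := hrel
  refine ⟨pvShape_vset h w v hsh y x d, by rw [List.length_set]; exact hbvlen, ?_⟩
  intro y0 hy0 x0 hx0 d0 hd0
  rw [pvVget_vset h w v hsh y x d y0 x0 d0 hy hx hd hy0 hx0 hd0, pvGetD_set]
  have he0 : 4 * (w * y0 + x0) + d0 < bv.length := by
    rw [hbvlen]; exact pvEncLt h w y0 x0 d0 hy0 hx0 hd0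
  by_cases heq : 4 * (w * y + x) + d = 4 * (w * y0 + x0) + d0
  · obtain ⟨e1, e2, e3⟩ := pvDecode w y x d hx hd
    obtain ⟨f1, f2, f3⟩ := pvDecode w y0 x0 d0 hx0 hd0
    have htr : y0 = y ∧ x0 = x ∧ d0 = d := by
      refine ⟨?_, ?_, ?_⟩
      · rw [← e1, ← f1, heq]
      · rw [← e2, ← f2, heq]
      · rw [← e3, ← f3, heq]
    rw [if_pos htr, if_pos ⟨heq, he0⟩]
  · have htr : ¬(y0 = y ∧ x0 = x ∧ d0 = d) := by
      rintro ⟨rfl, rfl, rfl⟩; exact heq rfl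
    rw [if_neg htr, if_neg (by tauto)]
    exact hpt y0 hy0 x0 hx0 d0 hd0

-- Python (a-1) % m and (a+1) % m on a Nat a, positive Nat m
lemma pvModAdd1 (a m : Nat) : PySem.Int.mod ((a : Int) + 1) (m : Int) = (((a + 1) % m : Nat) : Int) := by
  have h1 : ((a : Int) + 1) = (((a + 1 : Nat)) : Int) := by push_cast; ring
  rw [h1, PySem.Int.mod_natCast]

lemma pvModSub1 (a m : Nat) (hm : 0 < m) :
    PySem.Int.mod ((a : Int) - 1) (m : Int) = (((a + m - 1) % m : Nat) : Int) := by
  have h1 : ((a : Int) - 1) = (((a + m - 1 : Nat)) : Int) - (m : Int) := by omega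
  rw [h1, PySem.Int.mod_eq_emod_of_pos (by exact_mod_cast hm), Int.sub_emod_right]
  norm_cast

def pvRotA (grid : List String) (y x d : Nat) : Int :=
  if pvGridChar grid y x = 'S' then (d : Int)
  else if pvGridChar grid y x = 'L' then PySem.Int.mod ((d : Int) - 1) 4
  else if pvGridChar grid y x = 'R' then PySem.Int.mod ((d : Int) + 1) 4
  else (d : Int)

lemma pvStep_corr (grid : List String) (h w y x d : Nat) (hh : 0 < h) (hw : 0 < w)
    (hy : y < h) (hx : x < w) (hd : d < 4) :
    ∃ y' x' d' : Nat, y' < h ∧ x' < w ∧ d' < 4 ∧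
      pvStep grid h w (4 * (w * y + x) + d) = 4 * (w * y' + x') + d' ∧
      pvRotA grid y x d = (d' : Int) ∧
      PySem.Int.mod ((y : Int) + (pvDxy (pvRotA grid y x d)).1) (h : Int) = (y' : Int) ∧
      PySem.Int.mod ((x : Int) + (pvDxy (pvRotA grid y x d)).2) (w : Int) = (x' : Int) := by
  obtain ⟨e1, e2, e3⟩ := pvDecode w y x d hx hd
  have hB : pvStep grid h w (4 * (w * y + x) + d) =
      (let d' := if pvGridChar grid y x = 'L' then (d + 3) % 4
                 else if pvGridChar grid y x = 'R' then (d + 1) % 4 else d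
       let p := if d' = 0 then ((y + 1) % h, x)
                else if d' = 1 then (y, (x + w - 1) % w)
                else if d' = 2 then ((y + h - 1) % h, x)
                else (y, (x + 1) % w)
       4 * (w * p.1 + p.2) + d') := by
    simp only [pvStep, e1, e2, e3]
  set d2 : Nat := if pvGridChar grid y x = 'L' then (d + 3) % 4
                  else if pvGridChar grid y x = 'R' then (d + 1) % 4 else d with hd2
  have hd2lt : d2 < 4 := by rw [hd2]; split_ifs <;> omega
  have hdA : pvRotA grid y x d = (d2 : Int) := by
    rw [pvRotA, hd2]
    by_cases hS : pvGridChar grid y x = 'S'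
    · simp [hS]
    · by_cases hL : pvGridChar grid y x = 'L'
      · simp only [if_neg hS, if_pos hL]
        interval_cases d <;> decide
      · by_cases hR : pvGridChar grid y x = 'R'
        · simp only [if_neg hS, if_neg hL, if_pos hR]
          interval_cases d <;> decide
        · simp [hS, hL, hR]
  rw [hdA]
  have hc4 : d2 = 0 ∨ d2 = 1 ∨ d2 = 2 ∨ d2 = 3 := by omega
  rcases hc4 with h0 | h1 | h2 | h3
  · refine ⟨(y + 1) % h, x, 0, Nat.mod_lt _ hh, hx, by omega, ?_, by rw [h0], ?_, ?_⟩
    · rw [hB]; simp only [h0]; norm_num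
    · rw [h0]; norm_num [pvDxy]; exact pvModAdd1 y h
    · rw [h0]; norm_num [pvDxy, Nat.mod_eq_of_lt hx]
  · refine ⟨y, (x + w - 1) % w, 1, hy, Nat.mod_lt _ hw, by omega, ?_, by rw [h1], ?_, ?_⟩
    · rw [hB]; simp only [h1]; norm_num
    · rw [h1]; norm_num [pvDxy, Nat.mod_eq_of_lt hy]
    · rw [h1]; norm_num [pvDxy]; exact pvModSub1 x w hw
  · refine ⟨(y + h - 1) % h, x, 2, Nat.mod_lt _ hh, hx, by omega, ?_, by rw [h2], ?_, ?_⟩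
    · rw [hB]; simp only [h2]; norm_num
    · rw [h2]; norm_num [pvDxy]; exact pvModSub1 y h hh
    · rw [h2]; norm_num [pvDxy, Nat.mod_eq_of_lt hx]
  · refine ⟨y, (x + 1) % w, 3, hy, Nat.mod_lt _ hw, by omega, ?_, by rw [h3], ?_, ?_⟩
    · rw [hB]; simp only [h3]; norm_num
    · rw [h3]; norm_num [pvDxy, Nat.mod_eq_of_lt hy]
    · rw [h3]; norm_num [pvDxy]; exact pvModAdd1 x w

lemma pvRunA_succ (grid : List String) (h w : Int) (fuel : Nat)
    (v : List (List (List Bool))) (count : Int) (y x d : Nat) :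
    pvRunA grid h w (fuel + 1) v count (y : Int) (x : Int) (d : Int) =
      if pvVget v y x d then (v, count)
      else
        pvRunA grid h w fuel (pvVset v y x d) (count + 1)
          (PySem.Int.mod ((y : Int) +
            (pvDxy (if pvGridChar grid y x = 'S' then (d : Int)
                    else if pvGridChar grid y x = 'L' then PySem.Int.mod ((d : Int) - 1) 4
                    else if pvGridChar grid y x = 'R' then PySem.Int.mod ((d : Int) + 1) 4
                    else (d : Int))).1) h)
          (PySem.Int.mod ((x : Int) +
            (pvDxy (if pvGridChar grid y x = 'S' then (d : Int)
                    else if pvGridChar grid y x = 'L' then PySem.Int.mod ((d : Int) - 1) 4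
                    else if pvGridChar grid y x = 'R' then PySem.Int.mod ((d : Int) + 1) 4
                    else (d : Int))).2) w)
          (if pvGridChar grid y x = 'S' then (d : Int)
           else if pvGridChar grid y x = 'L' then PySem.Int.mod ((d : Int) - 1) 4
           else if pvGridChar grid y x = 'R' then PySem.Int.mod ((d : Int) + 1) 4
           else (d : Int)) := rfl

-- flat-state rendering of A's inner while loop, used only by the proofs
def pvWalkF (grid : List String) (h w : Nat) : Nat → List Bool → Int → Nat → List Bool × Int
  | 0, vis, count, _ => (vis, count)
  | fuel + 1, vis, count, cur =>
    if vis.getD cur false then (vis, count)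
    else pvWalkF grid h w fuel (vis.set cur true) (count + 1) (pvStep grid h w cur)

lemma pvWalk_corr (grid : List String) (h w : Nat) (hh : 0 < h) (hw : 0 < w) :
    ∀ (fuel : Nat) (v : List (List (List Bool))) (bv : List Bool) (count : Int)
      (y x d : Nat), y < h → x < w → d < 4 → pvRel h w v bv →
      pvRel h w (pvRunA grid (h : Int) (w : Int) fuel v count (y : Int) (x : Int) (d : Int)).1
        (pvWalkF grid h w fuel bv count (4 * (w * y + x) + d)).1 ∧
      (pvRunA grid (h : Int) (w : Int) fuel v count (y : Int) (x : Int) (d : Int)).2 =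
        (pvWalkF grid h w fuel bv count (4 * (w * y + x) + d)).2 := by
  intro fuel
  induction fuel with
  | zero =>
    intro v bv count y x d hy hx hd hrel
    exact ⟨hrel, rfl⟩
  | succ fuel ih =>
    intro v bv count y x d hy hx hd hrel
    have hvis : pvVget v y x d = bv.getD (4 * (w * y + x) + d) false :=
      hrel.2.2 y hy x hx d hd
    obtain ⟨y', x', d', hy', hx', hd', hstep, hrot, hmy, hmx⟩ :=
      pvStep_corr grid h w y x d hh hw hy hx hd
    have hrot' : (if pvGridChar grid y x = 'S' then (d : Int)
        else if pvGridChar grid y x = 'L' then PySem.Int.mod ((d : Int) - 1) 4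
        else if pvGridChar grid y x = 'R' then PySem.Int.mod ((d : Int) + 1) 4
        else (d : Int)) = (d' : Int) := hrot
    rw [hrot] at hmy hmx
    rw [pvRunA_succ]
    simp only [pvWalkF]
    rw [← hvis]
    by_cases hv : pvVget v y x d = true
    · simp only [hv, if_true]
      exact ⟨hrel, trivial⟩
    · simp only [hv, if_false, Bool.false_eq_true]
      rw [hrot', hmy, hmx, hstep]
      exact ih (pvVset v y x d) (bv.set (4 * (w * y + x) + d) true) (count + 1) y' x' d'
        hy' hx' hd' (pvRel_vset h w v bv hrel y x d hy hx hd)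

lemma pvFoldlRel {α β γ : Type} (R : α → β → Prop) (f : α → γ → α) (g : β → γ → β) :
    ∀ (l : List γ) (a : α) (b : β), R a b →
      (∀ c ∈ l, ∀ a b, R a b → R (f a c) (g b c)) → R (l.foldl f a) (l.foldl g b) := by
  intro l
  induction l with
  | nil => intro a b hR _; exact hR
  | cons c l ih =>
    intro a b hR hstep
    exact ih _ _ (hstep c (by simp) a b hR) (fun c' hc' => hstep c' (by simp [hc']))

lemma pvRangeMul (a b : Nat) :
    List.range (a * b) =
      (List.range a).flatMap (fun i => (List.range b).map (fun j => b * i + j)) := by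
  induction a with
  | zero => simp
  | succ a ih =>
    rw [Nat.succ_mul, List.range_add, ih, List.range_succ, List.flatMap_append]
    simp [Nat.mul_comm]

lemma pvFoldlFlatten {α : Type} (F : α → Nat → α) (a : α) (h w : Nat) :
    (List.range (h * w * 4)).foldl F a =
      (List.range h).foldl (fun acc y => (List.range w).foldl (fun acc x =>
        (List.range 4).foldl (fun acc d => F acc (4 * (w * y + x) + d)) acc) acc) a := by
  rw [show h * w * 4 = h * (w * 4) by ring, pvRangeMul h (w * 4), List.foldl_flatMap]
  have hfun : (fun (acc : α) (i : Nat) =>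
      (((List.range (w * 4)).map (fun j => (w * 4) * i + j)).foldl F acc)) =
      (fun acc y => (List.range w).foldl (fun acc x =>
        (List.range 4).foldl (fun acc d => F acc (4 * (w * y + x) + d)) acc) acc) := by
    funext acc y
    rw [List.foldl_map, pvRangeMul w 4, List.foldl_flatMap]
    have hfun2 : (fun (acc : α) (x : Nat) =>
        (((List.range 4).map (fun j => 4 * x + j)).foldl
          (fun acc j => F acc ((w * 4) * y + j)) acc)) =
        (fun acc x => (List.range 4).foldl (fun acc d => F acc (4 * (w * y + x) + d)) acc) := by
      funext acc x
      rw [List.foldl_map]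
      have : (fun (acc : α) (d : Nat) => F acc ((w * 4) * y + (4 * x + d))) =
          (fun acc d => F acc (4 * (w * y + x) + d)) := by
        funext acc d
        congr 1
        ring
      rw [this]
    rw [hfun2]
  rw [hfun]

def pvAloop (grid : List String) (h w : Nat) : List (List (List Bool)) × List Int :=
  (List.range h).foldl (fun acc y =>
    (List.range w).foldl (fun acc x =>
      (List.range 4).foldl (fun acc d =>
        if pvVget acc.1 y x d then acc
        else
          let r := pvRunA grid (h : Int) (w : Int) (h * w * 4 + 1) acc.1 0
            (y : Int) (x : Int) (d : Int)
          (r.1, acc.2 ++ [r.2])) acc) acc)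
    (List.replicate h (List.replicate w (List.replicate 4 false)), ([] : List Int))

def pvFlatLoop (grid : List String) (h w : Nat) : List Bool × List Int :=
  (List.range (h * w * 4)).foldl (fun acc s =>
    if acc.1.getD s false then acc
    else
      let r := pvWalkF grid h w (h * w * 4 + 1) acc.1 0 s
      (r.1, acc.2 ++ [r.2])) (List.replicate (h * w * 4) false, ([] : List Int))

lemma pvA_eq (grid : List String) :
    solution grid =
      PySem.List.sorted
        (pvAloop grid grid.length (grid.getD 0 "").toList.length).2 (fun z => z) false := by
  have h4 : (4 : Int) = ((4 : Nat) : Int) := by norm_num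
  simp only [solution, pvAloop, h4, PySem.List.pyRange_zero_natCast, List.foldl_map]
  rfl

lemma pvRel_init (h w : Nat) :
    pvRel h w (List.replicate h (List.replicate w (List.replicate 4 false)))
      (List.replicate (h * w * 4) false) := by
  refine ⟨⟨by simp, ?_, ?_⟩, by simp, ?_⟩
  · intro i hi
    simp [List.getD_eq_getElem?_getD, hi]
  · intro i hi j hj
    simp [List.getD_eq_getElem?_getD, hi, hj]
  · intro y hy x hx d hd
    simp [pvVget, List.getD_eq_getElem?_getD, List.getElem?_replicate, hy, hx, hd]
    split_ifs <;> interval_cases d <;> rfl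

lemma pvLoop_eq (grid : List String) (h w : Nat) :
    (pvAloop grid h w).2 = (pvFlatLoop grid h w).2 := by
  have hmain : pvRel h w (pvAloop grid h w).1 (pvFlatLoop grid h w).1 ∧
      (pvAloop grid h w).2 = (pvFlatLoop grid h w).2 := by
    unfold pvAloop pvFlatLoop
    rw [pvFoldlFlatten]
    refine pvFoldlRel (fun (a : List (List (List Bool)) × List Int) (b : List Bool × List Int) => pvRel h w a.1 b.1 ∧ a.2 = b.2) _ _ _ _ _
      ⟨pvRel_init h w, rfl⟩ ?_
    intro y hy a b hab
    refine pvFoldlRel (fun (a : List (List (List Bool)) × List Int) (b : List Bool × List Int) => pvRel h w a.1 b.1 ∧ a.2 = b.2) _ _ _ _ _ hab ?_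
    intro x hx a b hab
    refine pvFoldlRel (fun (a : List (List (List Bool)) × List Int) (b : List Bool × List Int) => pvRel h w a.1 b.1 ∧ a.2 = b.2) _ _ _ _ _ hab ?_
    intro d hd a b hab
    have hy' : y < h := List.mem_range.mp hy
    have hx' : x < w := List.mem_range.mp hx
    have hd' : d < 4 := List.mem_range.mp hd
    obtain ⟨hrel, hres⟩ := hab
    have hvis : pvVget a.1 y x d = b.1.getD (4 * (w * y + x) + d) false :=
      hrel.2.2 y hy' x hx' d hd'
    rw [← hvis]
    by_cases hv : pvVget a.1 y x d = true
    · simp only [hv, if_true]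
      exact ⟨hrel, hres⟩
    · simp only [hv, if_false, Bool.false_eq_true]
      obtain ⟨hW1, hW2⟩ := pvWalk_corr grid h w (by omega) (by omega) (h * w * 4 + 1)
        a.1 b.1 0 y x d hy' hx' hd' hrel
      exact ⟨hW1, by rw [hres, hW2]⟩
  exact hmain.2

-- ==== the step map is a permutation of the flattened state space ====

-- explicit inverse of pvStep (undo the move, then undo the rotation)
def pvPrev (grid : List String) (h w : Nat) (j : Nat) : Nat :=
  let y := j / (4 * w)
  let x := j / 4 % w
  let d := j % 4
  let p := if d = 0 then ((y + h - 1) % h, x)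
           else if d = 1 then (y, (x + 1) % w)
           else if d = 2 then ((y + 1) % h, x)
           else (y, (x + w - 1) % w)
  let c := pvGridChar grid p.1 p.2
  let d0 := if c = 'L' then (d + 1) % 4 else if c = 'R' then (d + 3) % 4 else d
  4 * (w * p.1 + p.2) + d0

lemma pvM1 (a m : Nat) (ha : a < m) : ((a + 1) % m + m - 1) % m = a := by
  rcases Nat.lt_or_ge (a + 1) m with h | h
  · rw [Nat.mod_eq_of_lt h]
    have h2 : a + 1 + m - 1 = a + m := by omega
    rw [h2, Nat.add_mod_right, Nat.mod_eq_of_lt ha]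
  · have h2 : a + 1 = m := by omega
    rw [h2, Nat.mod_self]
    have h3 : 0 + m - 1 = a := by omega
    rw [h3, Nat.mod_eq_of_lt ha]


lemma pvPrev_step (grid : List String) (h w y x d : Nat) (hh : 0 < h) (hw : 0 < w)
    (hy : y < h) (hx : x < w) (hd : d < 4) :
    pvPrev grid h w (pvStep grid h w (4 * (w * y + x) + d)) = 4 * (w * y + x) + d := by
  obtain ⟨e1, e2, e3⟩ := pvDecode w y x d hx hd
  set c := pvGridChar grid y x with hc
  set d2 : Nat := if c = 'L' then (d + 3) % 4 else if c = 'R' then (d + 1) % 4 else d with hd2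
  have hd2lt : d2 < 4 := by rw [hd2]; split_ifs <;> omega
  set y2 := (if d2 = 0 then (y + 1) % h else if d2 = 2 then (y + h - 1) % h else y) with hy2
  set x2 := (if d2 = 1 then (x + w - 1) % w else if d2 = 3 then (x + 1) % w else x) with hx2
  have hy2lt : y2 < h := by
    rw [hy2]; split_ifs
    · exact Nat.mod_lt _ hh
    · exact Nat.mod_lt _ hh
    · exact hy
  have hx2lt : x2 < w := by
    rw [hx2]; split_ifs
    · exact Nat.mod_lt _ hw
    · exact Nat.mod_lt _ hw
    · exact hx
  have hstep : pvStep grid h w (4 * (w * y + x) + d) = 4 * (w * y2 + x2) + d2 := by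
    simp only [pvStep, e1, e2, e3, ← hc, ← hd2]
    rcases (by omega : d2 = 0 ∨ d2 = 1 ∨ d2 = 2 ∨ d2 = 3) with hv | hv | hv | hv <;>
      simp [hv, hy2, hx2]
  rw [hstep]
  obtain ⟨f1, f2, f3⟩ := pvDecode w y2 x2 d2 hx2lt hd2lt
  simp only [pvPrev, f1, f2, f3]
  have hpos : (if d2 = 0 then ((y2 + h - 1) % h, x2)
               else if d2 = 1 then (y2, (x2 + 1) % w)
               else if d2 = 2 then ((y2 + 1) % h, x2)
               else (y2, (x2 + w - 1) % w)) = (y, x) := by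
    rcases (by omega : d2 = 0 ∨ d2 = 1 ∨ d2 = 2 ∨ d2 = 3) with hv | hv | hv | hv
    · simp only [hv, hy2, hx2]
      norm_num [Prod.mk.injEq]
      exact pvM1 y h hy
    · simp only [hv, hy2, hx2]
      norm_num [Prod.mk.injEq]
      have e1 : x + w - 1 + 1 = x + w := by omega
      rw [e1, Nat.add_mod_right]
      exact Nat.mod_eq_of_lt hx
    · simp only [hv, hy2, hx2]
      norm_num [Prod.mk.injEq]
      have e1 : y + h - 1 + 1 = y + h := by omega
      rw [e1, Nat.add_mod_right]
      exact Nat.mod_eq_of_lt hy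
    · simp only [hv, hy2, hx2]
      norm_num [Prod.mk.injEq]
      exact pvM1 x w hx
  rw [hpos]
  simp only [← hc]
  have hback : (if c = 'L' then (d2 + 1) % 4 else if c = 'R' then (d2 + 3) % 4 else d2) = d := by
    rw [hd2]
    by_cases h1 : c = 'L'
    · simp only [h1]
      simp
      omega
    · by_cases h2 : c = 'R'
      · simp only [h2]
        simp
        omega
      · simp [h1, h2]
  rw [hback]

lemma pvStep_lt (grid : List String) (h w : Nat) (hh : 0 < h) (hw : 0 < w)
    (i : Nat) (hi : i < h * w * 4) : pvStep grid h w i < h * w * 4 := by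
  obtain ⟨y, x, d, hy, hx, hd, rfl⟩ := pvDecodeAll h w i hw hi
  obtain ⟨y', x', d', hy', hx', hd', hstep, -⟩ := pvStep_corr grid h w y x d hh hw hy hx hd
  rw [hstep]
  exact pvEncLt h w y' x' d' hy' hx' hd'

lemma pvStep_inj (grid : List String) (h w : Nat) (hh : 0 < h) (hw : 0 < w)
    (i j : Nat) (hi : i < h * w * 4) (hj : j < h * w * 4)
    (he : pvStep grid h w i = pvStep grid h w j) : i = j := by
  obtain ⟨y, x, d, hy, hx, hd, rfl⟩ := pvDecodeAll h w i hw hi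
  obtain ⟨y', x', d', hy', hx', hd', rfl⟩ := pvDecodeAll h w j hw hj
  have h1 := pvPrev_step grid h w y x d hh hw hy hx hd
  have h2 := pvPrev_step grid h w y' x' d' hh hw hy' hx' hd'
  rw [he] at h1
  rw [h2] at h1
  exact h1.symm

-- ==== generic facts about iterating an injective self-map of [0,n) ====

lemma pvIterLt (f : Nat → Nat) (n : Nat) (hf : ∀ i, i < n → f i < n) :
    ∀ (k s : Nat), s < n → f^[k] s < n := by
  intro k
  induction k with
  | zero => intro s hs; simpa using hs
  | succ k ih =>
    intro s hs
    rw [Function.iterate_succ_apply']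
    exact hf _ (ih s hs)

lemma pvIterInj (f : Nat → Nat) (n : Nat) (hf : ∀ i, i < n → f i < n)
    (hinj : ∀ i j, i < n → j < n → f i = f j → i = j) :
    ∀ (k : Nat) (i j : Nat), i < n → j < n → f^[k] i = f^[k] j → i = j := by
  intro k
  induction k with
  | zero => intro i j _ _ he; simpa using he
  | succ k ih =>
    intro i j hi hj he
    rw [Function.iterate_succ_apply', Function.iterate_succ_apply'] at he
    exact ih i j hi hj
      (hinj _ _ (pvIterLt f n hf k i hi) (pvIterLt f n hf k j hj) he)

lemma pvCancel (f : Nat → Nat) (n : Nat) (hf : ∀ i, i < n → f i < n)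
    (hinj : ∀ i j, i < n → j < n → f i = f j → i = j)
    (a b s : Nat) (hs : s < n) (hab : a ≤ b) (he : f^[a] s = f^[b] s) :
    f^[b - a] s = s := by
  apply pvIterInj f n hf hinj a _ _ (pvIterLt f n hf _ s hs) hs
  rw [← Function.iterate_add_apply]
  have hba : a + (b - a) = b := by omega
  rw [hba, ← he]

lemma pvExistsPeriod (f : Nat → Nat) (n : Nat) (hf : ∀ i, i < n → f i < n)
    (hinj : ∀ i j, i < n → j < n → f i = f j → i = j)
    (s : Nat) (hs : s < n) : ∃ p, 0 < p ∧ p ≤ n ∧ f^[p] s = s := by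
  obtain ⟨a, b, hne, heq⟩ := Fintype.exists_ne_map_eq_of_card_lt
    (fun k : Fin (n + 1) => (⟨f^[(k : Nat)] s, pvIterLt f n hf _ s hs⟩ : Fin n))
    (by simp)
  have hv : f^[(a : Nat)] s = f^[(b : Nat)] s := by
    have := congrArg Fin.val heq
    simpa using this
  have hvne : (a : Nat) ≠ (b : Nat) := fun hcc => hne (Fin.ext hcc)
  rcases le_total (a : Nat) (b : Nat) with hle | hle
  · exact ⟨(b : Nat) - (a : Nat), by omega, by have := b.isLt; omega,
      pvCancel f n hf hinj _ _ s hs hle hv⟩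
  · exact ⟨(a : Nat) - (b : Nat), by omega, by have := a.isLt; omega,
      pvCancel f n hf hinj _ _ s hs hle hv.symm⟩

lemma pvIterPeriodMul (f : Nat → Nat) (p s : Nat) (hp : f^[p] s = s) :
    ∀ j, f^[p * j] s = s := by
  intro j
  induction j with
  | zero => simp
  | succ j ih => rw [Nat.mul_succ, Function.iterate_add_apply, hp, ih]

lemma pvIterMod (f : Nat → Nat) (p s : Nat) (_hp0 : 0 < p) (hp : f^[p] s = s) (k : Nat) :
    f^[k] s = f^[k % p] s := by
  conv_lhs => rw [← Nat.mod_add_div k p]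
  rw [Function.iterate_add_apply, pvIterPeriodMul f p s hp (k / p)]

lemma pvMinPeriod (f : Nat → Nat) (n : Nat) (hf : ∀ i, i < n → f i < n)
    (hinj : ∀ i j, i < n → j < n → f i = f j → i = j)
    (s : Nat) (hs : s < n) :
    ∃ p, 0 < p ∧ p ≤ n ∧ f^[p] s = s ∧ ∀ k, 0 < k → k < p → f^[k] s ≠ s := by
  obtain ⟨q, hq0, hqn, hq⟩ := pvExistsPeriod f n hf hinj s hs
  have hex : ∃ p, 0 < p ∧ f^[p] s = s := ⟨q, hq0, hq⟩
  refine ⟨Nat.find hex, (Nat.find_spec hex).1, ?_, (Nat.find_spec hex).2, ?_⟩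
  · exact le_trans (Nat.find_min' hex ⟨hq0, hq⟩) hqn
  · intro k hk0 hkp hke
    exact (Nat.find_min hex hkp) ⟨hk0, hke⟩

lemma pvDistinct (f : Nat → Nat) (n : Nat) (hf : ∀ i, i < n → f i < n)
    (hinj : ∀ i j, i < n → j < n → f i = f j → i = j)
    (s p : Nat) (hs : s < n) (hmin : ∀ k, 0 < k → k < p → f^[k] s ≠ s)
    (a b : Nat) (ha : a < b) (hb : b < p) : f^[a] s ≠ f^[b] s := by
  intro he
  exact hmin (b - a) (by omega) (by omega) (pvCancel f n hf hinj a b s hs (by omega) he)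

lemma pvComplete (f : Nat → Nat) (p s k : Nat) (hk : k ≤ p) (hp : f^[p] s = s) :
    f^[p - k] (f^[k] s) = s := by
  rw [← Function.iterate_add_apply]
  have : p - k + k = p := by omega
  rw [this, hp]

-- reachability in the state graph
def pvReach (f : Nat → Nat) (s t : Nat) : Prop := ∃ k, f^[k] s = t


lemma pvReach_trans (f : Nat → Nat) (a b c : Nat) (h1 : pvReach f a b) (h2 : pvReach f b c) :
    pvReach f a c := by
  obtain ⟨k1, hk1⟩ := h1
  obtain ⟨k2, hk2⟩ := h2
  exact ⟨k2 + k1, by rw [Function.iterate_add_apply, hk1, hk2]⟩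


lemma pvReach_back (f : Nat → Nat) (n : Nat) (hf : ∀ i, i < n → f i < n)
    (hinj : ∀ i j, i < n → j < n → f i = f j → i = j)
    (s t : Nat) (hs : s < n) (h : pvReach f s t) : pvReach f t s := by
  obtain ⟨m, hm⟩ := h
  obtain ⟨q, hq0, hqn, hq⟩ := pvExistsPeriod f n hf hinj s hs
  refine ⟨m * q - m, ?_⟩
  rw [← hm, ← Function.iterate_add_apply]
  have hle : m ≤ m * q := Nat.le_mul_of_pos_right m hq0
  have harith : m * q - m + m = q * m := by rw [Nat.mul_comm q m]; omega
  rw [harith]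
  exact pvIterPeriodMul f q s hq m

-- ==== A's chain walk from an unvisited state marks exactly its cycle and counts its length ====

lemma pvWalkA_run (grid : List String) (h w : Nat) (hh : 0 < h) (hw : 0 < w)
    (s p : Nat) (hs : s < h * w * 4)
    (hpp : (pvStep grid h w)^[p] s = s)
    (hmin : ∀ k, 0 < k → k < p → (pvStep grid h w)^[k] s ≠ s) :
    ∀ (dd j : Nat), 0 < j → j + dd = p →
    ∀ (vis : List Bool) (count : Int) (fuel : Nat), dd ≤ fuel →
      vis.length = h * w * 4 → vis.getD s false = true →
      (∀ k, j ≤ k → k < p → vis.getD ((pvStep grid h w)^[k] s) false = false) →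
      ∃ vis', pvWalkF grid h w fuel vis count ((pvStep grid h w)^[j] s) =
          (vis', count + (dd : Int)) ∧
        vis'.length = h * w * 4 ∧
        (∀ i, vis'.getD i false = true ↔
          (vis.getD i false = true ∨ ∃ k, j ≤ k ∧ k < p ∧ (pvStep grid h w)^[k] s = i)) := by
  have hf : ∀ i, i < h * w * 4 → pvStep grid h w i < h * w * 4 :=
    fun i hi => pvStep_lt grid h w hh hw i hi
  have hinj : ∀ i j, i < h * w * 4 → j < h * w * 4 →
      pvStep grid h w i = pvStep grid h w j → i = j :=
    fun i j hi hj he => pvStep_inj grid h w hh hw i j hi hj he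
  intro dd
  induction dd with
  | zero =>
    intro j hj0 hjp vis count fuel hfu hlen hvs hmarks
    have hj : j = p := by omega
    subst hj
    refine ⟨vis, ?_, hlen, ?_⟩
    · rw [hpp]
      cases fuel with
      | zero => simp [pvWalkF]
      | succ m => simp only [pvWalkF, hvs, if_true, Nat.cast_zero, add_zero]
    · intro i
      constructor
      · intro hv
        exact Or.inl hv
      · rintro (hv | ⟨k, hk1, hk2, rfl⟩)
        · exact hv
        · omega
  | succ dd ih =>
    intro j hj0 hjp vis count fuel hfu hlen hvs hmarks
    have hjp' : j < p := by omega
    cases fuel with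
    | zero => omega
    | succ fu =>
      have hcurlt : (pvStep grid h w)^[j] s < h * w * 4 := pvIterLt _ _ hf j s hs
      have hcur_unvis : vis.getD ((pvStep grid h w)^[j] s) false = false :=
        hmarks j le_rfl hjp'
      have hstep1 : pvWalkF grid h w (fu + 1) vis count ((pvStep grid h w)^[j] s) =
          pvWalkF grid h w fu (vis.set ((pvStep grid h w)^[j] s) true) (count + 1)
            ((pvStep grid h w)^[j + 1] s) := by
        simp only [pvWalkF, hcur_unvis, Bool.false_eq_true, if_false,
          Function.iterate_succ_apply']
      have hne_s : (pvStep grid h w)^[j] s ≠ s := hmin j hj0 hjp'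
      obtain ⟨vis', heq, hlen', hiff⟩ := ih (j + 1) (by omega) (by omega)
        (vis.set ((pvStep grid h w)^[j] s) true) (count + 1) fu (by omega)
        (by rw [List.length_set]; exact hlen)
        (by rw [pvGetD_set]; rw [if_neg (by tauto)]; exact hvs)
        (by
          intro k hk1 hk2
          rw [pvGetD_set]
          rw [if_neg ?_]
          · exact hmarks k (by omega) hk2
          · rintro ⟨hc, -⟩
            exact pvDistinct _ _ hf hinj s p hs hmin j k (by omega) hk2 hc)
      refine ⟨vis', ?_, hlen', ?_⟩
      · rw [hstep1, heq]
        congr 1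
        push_cast
        ring
      · intro i
        rw [hiff i, pvGetD_set]
        constructor
        · intro hcase
          rcases hcase with hv | ⟨k, hk1, hk2, hk3⟩
          · by_cases hic : (pvStep grid h w)^[j] s = i ∧ i < vis.length
            · exact Or.inr ⟨j, le_rfl, hjp', hic.1⟩
            · rw [if_neg hic] at hv
              exact Or.inl hv
          · exact Or.inr ⟨k, by omega, hk2, hk3⟩
        · intro hcase
          rcases hcase with hv | ⟨k, hk1, hk2, hk3⟩
          · left
            by_cases hic : (pvStep grid h w)^[j] s = i ∧ i < vis.length
            · rw [if_pos hic]
            · rw [if_neg hic]; exact hv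
          · rcases Nat.eq_or_lt_of_le hk1 with hjk | hjk
            · left
              rw [if_pos ⟨by rw [← hjk] at hk3; exact hk3, by rw [hlen, ← hk3]; exact pvIterLt _ _ hf k s hs⟩]
            · exact Or.inr ⟨k, by omega, hk2, hk3⟩

lemma pvChainA (grid : List String) (h w : Nat) (hh : 0 < h) (hw : 0 < w)
    (s p : Nat) (hs : s < h * w * 4) (hp0 : 0 < p) (hpn : p ≤ h * w * 4)
    (hpp : (pvStep grid h w)^[p] s = s)
    (hmin : ∀ k, 0 < k → k < p → (pvStep grid h w)^[k] s ≠ s)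
    (vis : List Bool) (count : Int) (hlen : vis.length = h * w * 4)
    (horb : ∀ k, k < p → vis.getD ((pvStep grid h w)^[k] s) false = false) :
    ∃ vis', pvWalkF grid h w (h * w * 4 + 1) vis count s = (vis', count + (p : Int)) ∧
      vis'.length = h * w * 4 ∧
      (∀ i, vis'.getD i false = true ↔
        (vis.getD i false = true ∨ ∃ k, k < p ∧ (pvStep grid h w)^[k] s = i)) := by
  have hvs : vis.getD s false = false := by simpa using horb 0 hp0
  have hstep1 : pvWalkF grid h w (h * w * 4 + 1) vis count s =
      pvWalkF grid h w (h * w * 4) (vis.set s true) (count + 1)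
        ((pvStep grid h w)^[1] s) := by
    simp only [pvWalkF, hvs, Bool.false_eq_true, if_false, Function.iterate_one]
  obtain ⟨vis', heq, hlen', hiff⟩ := pvWalkA_run grid h w hh hw s p hs hpp hmin
    (p - 1) 1 (by omega) (by omega) (vis.set s true) (count + 1) (h * w * 4) (by omega)
    (by rw [List.length_set]; exact hlen)
    (by rw [pvGetD_set, if_pos ⟨rfl, by omega⟩])
    (by
      intro k hk1 hk2
      rw [pvGetD_set, if_neg ?_]
      · exact horb k hk2
      · rintro ⟨hc, -⟩
        exact hmin k (by omega) hk2 hc.symm)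
  refine ⟨vis', ?_, hlen', ?_⟩
  · rw [hstep1, heq]
    congr 1
    have : ((p - 1 : Nat) : Int) = (p : Int) - 1 := by omega
    rw [this]
    ring
  · intro i
    rw [hiff i, pvGetD_set]
    constructor
    · rintro (hv | ⟨k, hk1, hk2, hk3⟩)
      · by_cases hic : s = i ∧ i < vis.length
        · exact Or.inr ⟨0, hp0, by simpa using hic.1⟩
        · rw [if_neg hic] at hv
          exact Or.inl hv
      · exact Or.inr ⟨k, hk2, hk3⟩
    · rintro (hv | ⟨k, hk2, hk3⟩)
      · left
        by_cases hic : s = i ∧ i < vis.length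
        · rw [if_pos hic]
        · rw [if_neg hic]; exact hv
      · rcases Nat.eq_zero_or_pos k with rfl | hk0
        · left
          rw [if_pos ⟨by simpa using hk3, by rw [hlen, ← hk3]; simpa using hs⟩]
        · exact Or.inr ⟨k, by omega, hk2, hk3⟩

-- ==== B's walk: comes back to a leader, dips below a non-leader ====

lemma pvWalkB_leader (grid : List String) (h w : Nat) (s p : Nat)
    (hpp : (pvStep grid h w)^[p] s = s)
    (hlead : ∀ k, 0 < k → k < p → s < (pvStep grid h w)^[k] s) :
    ∀ (dd j : Nat), 0 < j → j + dd = p →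
    ∀ (len : Int) (fuel : Nat), dd ≤ fuel →
      pvWalkAlt grid h w s fuel ((pvStep grid h w)^[j] s) len = (s, len + (dd : Int)) := by
  intro dd
  induction dd with
  | zero =>
    intro j hj0 hjp len fuel hfu
    have hj : j = p := by omega
    subst hj
    rw [hpp]
    cases fuel with
    | zero => simp [pvWalkAlt]
    | succ fu => simp [pvWalkAlt]
  | succ dd ih =>
    intro j hj0 hjp len fuel hfu
    cases fuel with
    | zero => omega
    | succ fu =>
      have hgt : s < (pvStep grid h w)^[j] s := hlead j hj0 (by omega)
      have hstep1 : pvWalkAlt grid h w s (fu + 1) ((pvStep grid h w)^[j] s) len =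
          pvWalkAlt grid h w s fu ((pvStep grid h w)^[j + 1] s) (len + 1) := by
        simp only [pvWalkAlt, if_pos hgt, Function.iterate_succ_apply']
      rw [hstep1, ih (j + 1) (by omega) (by omega) (len + 1) fu (by omega)]
      congr 1
      push_cast
      ring

lemma pvWalkB_nonleader (grid : List String) (h w : Nat) (s k0 : Nat)
    (hlow : (pvStep grid h w)^[k0] s < s)
    (hmid : ∀ k, 0 < k → k < k0 → s < (pvStep grid h w)^[k] s) :
    ∀ (dd j : Nat), 0 < j → j + dd = k0 →
    ∀ (len : Int) (fuel : Nat), dd ≤ fuel →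
      pvWalkAlt grid h w s fuel ((pvStep grid h w)^[j] s) len =
        ((pvStep grid h w)^[k0] s, len + (dd : Int)) := by
  intro dd
  induction dd with
  | zero =>
    intro j hj0 hjp len fuel hfu
    have hj : j = k0 := by omega
    subst hj
    have hns : ¬ s < (pvStep grid h w)^[j] s := by omega
    cases fuel with
    | zero => simp [pvWalkAlt]
    | succ fu => simp [pvWalkAlt, hns]
  | succ dd ih =>
    intro j hj0 hjp len fuel hfu
    cases fuel with
    | zero => omega
    | succ fu =>
      have hgt : s < (pvStep grid h w)^[j] s := hmid j hj0 (by omega)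
      have hstep1 : pvWalkAlt grid h w s (fu + 1) ((pvStep grid h w)^[j] s) len =
          pvWalkAlt grid h w s fu ((pvStep grid h w)^[j + 1] s) (len + 1) := by
        simp only [pvWalkAlt, if_pos hgt, Function.iterate_succ_apply']
      rw [hstep1, ih (j + 1) (by omega) (by omega) (len + 1) fu (by omega)]
      congr 1
      push_cast
      ring

lemma pvLoops (grid : List String) (h w : Nat) (hh : 0 < h) (hw : 0 < w) :
    ∀ m, m ≤ h * w * 4 →
      ∃ vis res,
        (List.range m).foldl (fun acc s =>
            if acc.1.getD s false then acc
            else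
              let r := pvWalkF grid h w (h * w * 4 + 1) acc.1 0 s
              (r.1, acc.2 ++ [r.2]))
          (List.replicate (h * w * 4) false, ([] : List Int)) = (vis, res) ∧
        (List.range m).foldl (fun res s =>
            let cur_len := pvWalkAlt grid h w s (h * w * 4) (pvStep grid h w s) 1
            if cur_len.1 = s then res ++ [cur_len.2] else res) ([] : List Int) = res ∧
        vis.length = h * w * 4 ∧
        (∀ i, vis.getD i false = true ↔ ∃ t, t < m ∧ pvReach (pvStep grid h w) t i) := by
  have hf : ∀ i, i < h * w * 4 → pvStep grid h w i < h * w * 4 :=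
    fun i hi => pvStep_lt grid h w hh hw i hi
  have hinj : ∀ i j, i < h * w * 4 → j < h * w * 4 →
      pvStep grid h w i = pvStep grid h w j → i = j :=
    fun i j hi hj he => pvStep_inj grid h w hh hw i j hi hj he
  intro m
  induction m with
  | zero =>
    intro _
    refine ⟨List.replicate (h * w * 4) false, [], by simp, by simp, by simp, ?_⟩
    intro i
    constructor
    · intro hv
      exfalso
      have hrep : (List.replicate (h * w * 4) false).getD i false = false := by
        simp [List.getD_eq_getElem?_getD, List.getElem?_replicate]
        split_ifs <;> rfl
      rw [hrep] at hv
      exact absurd hv (by simp)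
    · rintro ⟨t, ht, -⟩
      omega
  | succ m ih =>
    intro hm1
    obtain ⟨vis, res, hA, hB, hlen, hiff⟩ := ih (by omega)
    have hsn : m < h * w * 4 := by omega
    obtain ⟨p, hp0, hpn, hpp, hmin⟩ := pvMinPeriod (pvStep grid h w) (h * w * 4) hf hinj m hsn
    rw [List.range_succ, List.foldl_append, List.foldl_append, hA, hB]
    simp only [List.foldl_cons, List.foldl_nil]
    by_cases hvs : vis.getD m false = true
    · -- m already covered: A skips it, B sees it is not its cycle's leader
      obtain ⟨t, htm, htre⟩ := (hiff m).mp hvs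
      have htn : t < h * w * 4 := by omega
      obtain ⟨k, hk⟩ := pvReach_back (pvStep grid h w) (h * w * 4) hf hinj t m htn htre
      have hkmod : (pvStep grid h w)^[k % p] m = t := by
        rw [← pvIterMod (pvStep grid h w) p m hp0 hpp k]; exact hk
      have hkm0 : 0 < k % p := by
        rcases Nat.eq_zero_or_pos (k % p) with hz | hpos
        · rw [hz] at hkmod; simp at hkmod; omega
        · exact hpos
      have hexk : ∃ k', 0 < k' ∧ (pvStep grid h w)^[k'] m < m := by
        exact ⟨k % p, hkm0, by rw [hkmod]; exact htm⟩
      set k0 := Nat.find hexk with hk0def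
      have hk00 : 0 < k0 := (Nat.find_spec hexk).1
      have hlow : (pvStep grid h w)^[k0] m < m := (Nat.find_spec hexk).2
      have hk0le : k0 ≤ k % p := Nat.find_min' hexk ⟨hkm0, by rw [hkmod]; exact htm⟩
      have hk0p : k0 < p := lt_of_le_of_lt hk0le (Nat.mod_lt _ hp0)
      have hmid : ∀ k', 0 < k' → k' < k0 → m < (pvStep grid h w)^[k'] m := by
        intro k' hk'0 hk'k0
        have hnot : ¬ (0 < k' ∧ (pvStep grid h w)^[k'] m < m) := Nat.find_min hexk hk'k0
        have hne : (pvStep grid h w)^[k'] m ≠ m := hmin k' hk'0 (by omega)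
        omega
      have hwalk := pvWalkB_nonleader grid h w m k0 hlow hmid (k0 - 1) 1 (by omega)
        (by omega) 1 (h * w * 4) (by omega)
      rw [Function.iterate_one] at hwalk
      rw [hvs]
      simp only [if_true, hwalk]
      rw [if_neg (show ¬ ((pvStep grid h w)^[k0] m = m) by omega)]
      refine ⟨vis, res, rfl, rfl, hlen, ?_⟩
      intro i
      rw [hiff i]
      constructor
      · rintro ⟨t', ht', hre⟩
        exact ⟨t', by omega, hre⟩
      · rintro ⟨t', ht', hre⟩
        rcases Nat.lt_or_ge t' m with hlt | hge
        · exact ⟨t', hlt, hre⟩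
        · have ht'm : t' = m := by omega
          subst ht'm
          exact ⟨t, htm, pvReach_trans _ t t' i htre hre⟩
    · -- m uncovered: it is its cycle's leader; A walks and counts p, B appends p
      have hvsf : vis.getD m false = false := by
        cases hvb : vis.getD m false
        · rfl
        · exact absurd hvb hvs
      have hno : ∀ t, t < m → ¬ pvReach (pvStep grid h w) t m := by
        intro t ht hre
        exact hvs ((hiff m).mpr ⟨t, ht, hre⟩)
      have hlead : ∀ k, 0 < k → k < p → m < (pvStep grid h w)^[k] m := by
        intro k hk0 hkp
        rcases lt_trichotomy ((pvStep grid h w)^[k] m) m with hlt | heqq | hgt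
        · exfalso
          exact hno _ hlt ⟨p - k, pvComplete (pvStep grid h w) p m k (by omega) hpp⟩
        · exact absurd heqq (hmin k hk0 hkp)
        · exact hgt
      have horb : ∀ k, k < p → vis.getD ((pvStep grid h w)^[k] m) false = false := by
        intro k hkp
        rcases Nat.eq_zero_or_pos k with rfl | hk0
        · simpa using hvsf
        · cases hvb : vis.getD ((pvStep grid h w)^[k] m) false
          · rfl
          · exfalso
            obtain ⟨t, ht, htr⟩ := (hiff _).mp hvb
            exact hno t ht (pvReach_trans _ t _ m htr
              ⟨p - k, pvComplete (pvStep grid h w) p m k (by omega) hpp⟩)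
      obtain ⟨vis', heq, hlen', hiff'⟩ := pvChainA grid h w hh hw m p hsn hp0 hpn hpp hmin
        vis 0 hlen horb
      have hwalk := pvWalkB_leader grid h w m p hpp hlead (p - 1) 1 (by omega) (by omega)
        1 (h * w * 4) (by omega)
      rw [Function.iterate_one] at hwalk
      rw [hvsf]
      simp only [Bool.false_eq_true, if_false, heq, hwalk]
      simp only [if_true]
      refine ⟨vis', res ++ [(0 : Int) + (p : Int)], rfl, ?_, hlen', ?_⟩
      · have harr : (1 : Int) + ((p - 1 : Nat) : Int) = 0 + (p : Int) := by omega
        rw [harr]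
      · intro i
        rw [hiff' i, hiff i]
        constructor
        · rintro (⟨t, ht, hre⟩ | ⟨k, hkp, hki⟩)
          · exact ⟨t, by omega, hre⟩
          · exact ⟨m, by omega, ⟨k, hki⟩⟩
        · rintro ⟨t, ht, hre⟩
          rcases Nat.lt_or_ge t m with hlt | hge
          · exact Or.inl ⟨t, hlt, hre⟩
          · have htm : t = m := by omega
            subst htm
            obtain ⟨k, hk⟩ := hre
            exact Or.inr ⟨k % p, Nat.mod_lt _ hp0,
              by rw [← pvIterMod (pvStep grid h w) p t hp0 hpp k]; exact hk⟩

lemma pvB_eq (grid : List String) :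
    solution_alt grid =
      PySem.List.sorted
        ((List.range (grid.length * (grid.getD 0 "").toList.length * 4)).foldl (fun res s =>
          let cur_len := pvWalkAlt grid grid.length (grid.getD 0 "").toList.length s
            (grid.length * (grid.getD 0 "").toList.length * 4)
            (pvStep grid grid.length (grid.getD 0 "").toList.length s) 1
          if cur_len.1 = s then res ++ [cur_len.2] else res) ([] : List Int))
        (fun z => z) false := rfl

lemma pvMain (grid : List String) :
    (pvFlatLoop grid grid.length (grid.getD 0 "").toList.length).2 =
      (List.range (grid.length * (grid.getD 0 "").toList.length * 4)).foldl (fun res s =>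
        let cur_len := pvWalkAlt grid grid.length (grid.getD 0 "").toList.length s
          (grid.length * (grid.getD 0 "").toList.length * 4)
          (pvStep grid grid.length (grid.getD 0 "").toList.length s) 1
        if cur_len.1 = s then res ++ [cur_len.2] else res) ([] : List Int) := by
  by_cases hn : grid.length * (grid.getD 0 "").toList.length * 4 = 0
  · rw [pvFlatLoop, hn]
    simp
  · have hh : 0 < grid.length := by
      rcases Nat.eq_zero_or_pos grid.length with hz | hp
      · exfalso; apply hn; rw [hz]; ring
      · exact hp
    have hw : 0 < (grid.getD 0 "").toList.length := by
      rcases Nat.eq_zero_or_pos (grid.getD 0 "").toList.length with hz | hp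
      · exfalso; apply hn; rw [hz]; ring
      · exact hp
    obtain ⟨vis, res, hA, hB, -, -⟩ := pvLoops grid grid.length (grid.getD 0 "").toList.length
      hh hw (grid.length * (grid.getD 0 "").toList.length * 4) le_rfl
    rw [pvFlatLoop, hA, hB]

-- ===== VERDICT (by name: the statement is the Claim_ definition above) =====
theorem solution_spec : Claim_equal_solution := by
  unfold Claim_equal_solution Spec_solution
  intro grid _ _
  rw [pvA_eq, pvLoop_eq, pvB_eq, pvMain]
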